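-- pv_equiv track=rewrite | github.com/jonghyeon99/daily_project | KSW/Python_daily/20240602/20240602.py | solution
-- ===== SOURCE A (Python) =====
-- def solution(arr, query):
--     answer = []
--     answer_list = [arr]
--     i=0
--     for q_index in range(0, len(query)):
--
--         if q_index % 2 == 0:
--             answer_list.append(answer_list[i][:query[q_index]+1])
--             i+=1
--         else:
--             answer_list.append(answer_list[i][query[q_index]:])
--             i+=1
--     for number in answer_list[i]:
--         answer.append(number)
--     return answer
-- ===== SOURCE B (Python) =====
-- def solution(arr, query):
--     # Track start/end offsets into arr in one pass; take a single final slice.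
--     lo, hi = 0, len(arr)
--     for idx, q in enumerate(query):
--         L = hi - lo
--         t = q + 1 if idx % 2 == 0 else q
--         if t < 0:
--             t += L
--         t = max(0, min(t, L))
--         if idx % 2 == 0:
--             hi = lo + t
--         else:
--             lo = lo + t
--     return arr[lo:hi]
-- ===== Notes on version B (the rewrite author's own statement) =====
-- stated objective: alternative
-- what changed: Instead of materialising every intermediate sublist in a growing list of lists, B keeps only two integer offsets (lo, hi) into the original array, updates them per query with Python's slice-clamping arithmetic, and takes a single final slice.
import Mathlib
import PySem

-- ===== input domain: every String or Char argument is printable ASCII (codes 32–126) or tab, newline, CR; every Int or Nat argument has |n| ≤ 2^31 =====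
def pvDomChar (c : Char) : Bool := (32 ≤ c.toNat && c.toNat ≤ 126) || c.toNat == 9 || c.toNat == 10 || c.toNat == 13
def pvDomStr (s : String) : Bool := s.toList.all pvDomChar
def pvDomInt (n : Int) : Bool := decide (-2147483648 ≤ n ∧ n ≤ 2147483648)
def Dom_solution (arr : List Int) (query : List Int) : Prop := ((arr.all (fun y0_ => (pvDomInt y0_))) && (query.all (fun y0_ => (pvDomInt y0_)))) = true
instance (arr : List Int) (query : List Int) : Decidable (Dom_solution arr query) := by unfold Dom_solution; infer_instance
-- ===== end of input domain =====

-- B replaces A's growing list of intermediate sublists by two offsets (lo, hi) into arr and one final slice (objective: alternative).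

-- ===== PORT A =====
-- loop body of A's 'for q_index in range(0, len(query))'; state = (answer_list, i).
-- answer_list[i] and query[q_index] are always in range in A, so pyGetD's default is never used.
def stepA (query : List Int) (st : List (List Int) × Int) (qIdx : Int) : List (List Int) × Int :=
  if PySem.Int.mod qIdx 2 == 0 then
    (st.1 ++ [PySem.List.slice (PySem.List.pyGetD st.1 st.2 []) none (some (PySem.List.pyGetD query qIdx 0 + 1))], st.2 + 1)
  else
    (st.1 ++ [PySem.List.slice (PySem.List.pyGetD st.1 st.2 []) (some (PySem.List.pyGetD query qIdx 0)) none], st.2 + 1)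

def solution (arr : List Int) (query : List Int) : List Int :=
  -- final state of the first loop, then 'for number in answer_list[i]: answer.append(number)'
  (PySem.List.pyGetD ((PySem.List.pyRange 0 (PySem.List.len query)).foldl (stepA query) ([arr], 0)).1
      ((PySem.List.pyRange 0 (PySem.List.len query)).foldl (stepA query) ([arr], 0)).2 []).foldl
    (fun acc n => acc ++ [n]) []

-- ===== PORT B =====
-- loop body of B's 'for idx, q in enumerate(query)'; state = (lo, hi).
def stepB (st : Int × Int) (p : Int × Int) : Int × Int :=
  let L := st.2 - st.1
  let t0 := if PySem.Int.mod p.1 2 == 0 then p.2 + 1 else p.2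
  let t1 := if t0 < 0 then t0 + L else t0
  let t := max 0 (min t1 L)
  if PySem.Int.mod p.1 2 == 0 then (st.1, st.1 + t) else (st.1 + t, st.2)

def solution_alt (arr : List Int) (query : List Int) : List Int :=
  PySem.List.slice arr
    (some ((PySem.List.enumerate query).foldl stepB (0, (arr.length : Int))).1)
    (some ((PySem.List.enumerate query).foldl stepB (0, (arr.length : Int))).2)

-- ===== PRECONDITION & SPEC =====
def Spec_solution (arr : List Int) (query : List Int) (out : List Int) : Prop := out = solution_alt arr query
instance (arr : List Int) (query : List Int) (out : List Int) : Decidable (Spec_solution arr query out) := by unfold Spec_solution; infer_instance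

-- ===== CLAIM (what is proved, stated in full; the proofs are below) =====
def Claim_equal_solution : Prop := ∀ (arr : List Int) (query : List Int), Dom_solution arr query → Spec_solution arr query (solution arr query)

-- ===== LEMMAS AND PROOFS =====

-- A's loop body seen as a function of the pair (q_index, query[q_index]).
def gA (st : List (List Int) × Int) (p : Int × Int) : List (List Int) × Int :=
  if PySem.Int.mod p.1 2 == 0 then
    (st.1 ++ [PySem.List.slice (PySem.List.pyGetD st.1 st.2 []) none (some (p.2 + 1))], st.2 + 1)
  else
    (st.1 ++ [PySem.List.slice (PySem.List.pyGetD st.1 st.2 []) (some p.2) none], st.2 + 1)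

theorem stepA_eq_gA (query : List Int) (st : List (List Int) × Int) (qIdx : Int) :
    stepA query st qIdx = gA st (qIdx, PySem.List.pyGetD query qIdx 0) := rfl

theorem slice_none_some_eq_take {α : Type} (xs : List α) (b : Int) :
    PySem.List.slice xs none (some b) = xs.take (PySem.List.clampIdx xs.length b) := by
  simp [PySem.List.slice]

-- slicing a subarray [lo, hi) of arr from the left is slicing arr with a clamped upper bound
theorem slice_slice_to (arr : List Int) (lo hi b : Int)
    (h0 : 0 ≤ lo) (h1 : lo ≤ hi) (h2 : hi ≤ (arr.length : Int)) :
    PySem.List.slice (PySem.List.slice arr (some lo) (some hi)) none (some b)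
      = PySem.List.slice arr (some lo)
          (some (lo + max 0 (min (if b < 0 then b + (hi - lo) else b) (hi - lo)))) := by
  have hhi : 0 ≤ hi := le_trans h0 h1
  set t := max 0 (min (if b < 0 then b + (hi - lo) else b) (hi - lo)) with ht
  have ht0 : 0 ≤ t := le_max_left _ _
  rw [slice_none_some_eq_take, PySem.List.slice_toNat arr h0 hhi,
      PySem.List.slice_toNat arr h0 (by omega : (0:Int) ≤ lo + t), List.take_take]
  congr 1
  have hlen : (List.take (hi.toNat - lo.toNat) (List.drop lo.toNat arr)).length
      = hi.toNat - lo.toNat := by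
    simp [List.length_take, List.length_drop]; omega
  rw [hlen]
  simp only [PySem.List.clampIdx]
  split_ifs <;> omega

-- slicing a subarray [lo, hi) of arr from the right is slicing arr with a clamped lower bound
theorem slice_slice_from (arr : List Int) (lo hi a : Int)
    (h0 : 0 ≤ lo) (h1 : lo ≤ hi) (h2 : hi ≤ (arr.length : Int)) :
    PySem.List.slice (PySem.List.slice arr (some lo) (some hi)) (some a) none
      = PySem.List.slice arr (some (lo + max 0 (min (if a < 0 then a + (hi - lo) else a) (hi - lo)))) (some hi) := by
  have hhi : 0 ≤ hi := le_trans h0 h1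
  set t := max 0 (min (if a < 0 then a + (hi - lo) else a) (hi - lo)) with ht
  have ht0 : 0 ≤ t := le_max_left _ _
  rw [PySem.List.slice_some_none, PySem.List.slice_toNat arr h0 hhi,
      PySem.List.slice_toNat arr (by omega : (0:Int) ≤ lo + t) hhi,
      List.drop_take, List.drop_drop]
  have hlen : (List.take (hi.toNat - lo.toNat) (List.drop lo.toNat arr)).length
      = hi.toNat - lo.toNat := by
    simp [List.length_take, List.length_drop]; omega
  rw [hlen]
  have hc : PySem.List.clampIdx (hi.toNat - lo.toNat) a = t.toNat := by
    simp only [PySem.List.clampIdx]; split_ifs <;> omega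
  rw [hc]
  have h1' : lo.toNat + t.toNat = (lo + t).toNat := by omega
  have h2' : hi.toNat - lo.toNat - t.toNat = hi.toNat - (lo + t).toNat := by omega
  rw [h1', h2']

-- main invariant: A's fold keeps answer_list[i] equal to arr[lo:hi] for B's offsets (lo, hi)
theorem main_inv (arr : List Int) (qs : List Int) (s : Nat) (lst : List (List Int)) (lo hi : Int)
    (hlen : lst.length = s + 1)
    (hget : PySem.List.pyGetD lst (s : Int) ([] : List Int) = PySem.List.slice arr (some lo) (some hi))
    (h0 : 0 ≤ lo) (h1 : lo ≤ hi) (h2 : hi ≤ (arr.length : Int)) :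
    (PySem.List.pyGetD ((PySem.List.enumerate qs (s : Int)).foldl gA (lst, (s : Int))).1
        ((PySem.List.enumerate qs (s : Int)).foldl gA (lst, (s : Int))).2 [])
      = PySem.List.slice arr
          (some ((PySem.List.enumerate qs (s : Int)).foldl stepB (lo, hi)).1)
          (some ((PySem.List.enumerate qs (s : Int)).foldl stepB (lo, hi)).2) := by
  induction qs generalizing s lst lo hi with
  | nil => simpa [PySem.List.enumerate] using hget
  | cons q rest ih =>
    rw [PySem.List.enumerate_cons]
    simp only [List.foldl_cons, gA, stepB]
    have hs1 : ((s : Int) + 1) = ((s + 1 : Nat) : Int) := by push_cast; ring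
    have happ : ∀ x : List Int, PySem.List.pyGetD (lst ++ [x]) ((s + 1 : Nat) : Int) [] = x := by
      intro x
      have : ((s + 1 : Nat) : Int) = (lst.length : Int) := by rw [hlen]
      rw [this]
      simp [PySem.List.pyGetD]
    cases hc : (PySem.Int.mod ((s : Int)) 2 == 0) with
    | true =>
      simp only [if_true]
      rw [hs1]
      set t := max 0 (min (if q + 1 < 0 then q + 1 + (hi - lo) else q + 1) (hi - lo)) with ht
      have htb : 0 ≤ t ∧ t ≤ hi - lo := by omega
      apply ih (s + 1) _ lo (lo + t)
      · simp [hlen]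
      · rw [happ, hget, slice_slice_to arr lo hi (q + 1) h0 h1 h2]
      · exact h0
      · omega
      · omega
    | false =>
      simp only [if_false, Bool.false_eq_true]
      rw [hs1]
      set t := max 0 (min (if q < 0 then q + (hi - lo) else q) (hi - lo)) with ht
      have htb : 0 ≤ t ∧ t ≤ hi - lo := by omega
      apply ih (s + 1) _ (lo + t) hi
      · simp [hlen]
      · rw [happ, hget, slice_slice_from arr lo hi q h0 h1 h2]
      · omega
      · omega
      · exact h2

-- ===== VERDICT (by name: the statement is the Claim_ definition above) =====
theorem solution_spec : Claim_equal_solution := by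
  intro arr query _
  show _ = _
  unfold solution solution_alt
  rw [show (PySem.List.pyRange 0 (PySem.List.len query)).foldl (stepA query) ([arr], 0)
        = (PySem.List.enumerate query).foldl gA ([arr], 0) by
      rw [PySem.List.enumerate_eq_map_pyRange query 0, List.foldl_map]
      exact PySem.List.foldl_congr_mem _ _ _ _ (fun st x _ => stepA_eq_gA query st x)]
  have h := main_inv arr query 0 [arr] 0 (arr.length : Int) (by simp)
    (by simp [PySem.List.pyGetD, PySem.List.slice_toNat]) le_rfl
    (by positivity) le_rfl
  simp only [Nat.cast_zero] at h
  rw [h, PySem.List.foldl_append_singleton_eq_self, List.nil_append]
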